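-- pv_equiv track=rewrite | github.com/miliar/Code_Jam_Webscraper | Solutions_python/Problem_155/2480.py | amount_friends
-- ===== SOURCE A (Python) =====
-- def amount_friends (n,numbers):
-- 	friends = 0
-- 	counter = 0
-- 	for i in range(0,n+1):
-- 		amount_people = numbers[i]
--
-- 		if counter < i:
-- 			friends += (i-counter)
-- 			counter += i-counter
-- 		counter += amount_people
-- 		#print counter
-- 	return friends
-- ===== SOURCE B (Python) =====
-- def amount_friends(n, numbers):
--     # Divide-and-conquer: for a half-open block [lo, hi) return
--     # (sum of numbers[lo:hi], max over lo <= i < hi of (i - sum(numbers[lo:i]))).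
--     # The answer is the maximal deficit between index i and people already arrived.
--     if n < 0:
--         return 0
--
--     def block(lo, hi):
--         if hi - lo == 1:
--             return (numbers[lo], lo)
--         mid = (lo + hi) // 2
--         s1, m1 = block(lo, mid)
--         s2, m2 = block(mid, hi)
--         return (s1 + s2, max(m1, m2 - s1))
--
--     _, m = block(0, n + 1)
--     return m
-- ===== Notes on version B (the rewrite author's own statement) =====
-- stated objective: alternative
-- what changed: Replaces A's left-to-right hire-and-top-up simulation by a divide-and-conquer over index blocks that returns each block's (sum, max internal deficit) and merges halves with max(m1, m2 - s1).
import Mathlib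
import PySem

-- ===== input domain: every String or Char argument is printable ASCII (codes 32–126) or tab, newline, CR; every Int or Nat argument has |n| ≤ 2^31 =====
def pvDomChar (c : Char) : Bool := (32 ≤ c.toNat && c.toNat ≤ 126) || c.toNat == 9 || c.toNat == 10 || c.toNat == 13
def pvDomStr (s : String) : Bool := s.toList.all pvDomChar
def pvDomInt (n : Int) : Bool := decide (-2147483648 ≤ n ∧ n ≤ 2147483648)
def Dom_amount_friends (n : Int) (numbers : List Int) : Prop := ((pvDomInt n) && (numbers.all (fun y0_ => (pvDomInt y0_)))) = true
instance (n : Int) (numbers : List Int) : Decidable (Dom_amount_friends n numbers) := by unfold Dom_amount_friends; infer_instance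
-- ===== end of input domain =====

-- B replaces A's linear hire-and-top-up simulation by a divide-and-conquer over index blocks
-- returning (block sum, max internal deficit); objective: alternative.

-- ===== PORT A =====
-- state = (friends, counter); pyGetD is exact under Pre_ (index always in range there)
def amount_friends (n : Int) (numbers : List Int) : Int :=
  ((PySem.List.pyRange 0 (n + 1) 1).foldl
    (fun (st : Int × Int) (i : Int) =>
      let amount_people := PySem.List.pyGetD numbers i 0
      if st.2 < i then (st.1 + (i - st.2), st.2 + (i - st.2) + amount_people)
      else (st.1, st.2 + amount_people))
    (0, 0)).1

-- ===== PORT B =====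
-- block lo hi = (sum of numbers[lo:hi], max over lo ≤ i < hi of (i - sum numbers[lo:i])).
-- Source B's base test is 'hi - lo == 1'; the port tests 'hi - lo ≤ 1' and carries a Nat fuel
-- (hi - lo).toNat only to make the recursion structural — with the fuel it is given the
-- fuel never runs out and block is only invoked with lo < hi, where the test coincides
-- with Source B's and the port is exact.
def afBlock (numbers : List Int) (fuel : Nat) (lo hi : Int) : Int × Int :=
  match fuel with
  | 0 => (PySem.List.pyGetD numbers lo 0, lo)
  | fuel + 1 =>
    if hi - lo ≤ 1 then (PySem.List.pyGetD numbers lo 0, lo)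
    else
      let mid := PySem.Int.floordiv (lo + hi) 2
      let p1 := afBlock numbers fuel lo mid
      let p2 := afBlock numbers fuel mid hi
      (p1.1 + p2.1, max p1.2 (p2.2 - p1.1))

def amount_friends_alt (n : Int) (numbers : List Int) : Int :=
  if n < 0 then 0 else (afBlock numbers (n + 1).toNat 0 (n + 1)).2

-- ===== PRECONDITION & SPEC =====
-- Both Pythons raise IndexError when an index 0..n falls outside numbers; exactly those inputs are excluded.
def Pre_amount_friends (n : Int) (numbers : List Int) : Prop :=
  n < 0 ∨ n + 1 ≤ (numbers.length : Int)
instance (n : Int) (numbers : List Int) : Decidable (Pre_amount_friends n numbers) := by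
  unfold Pre_amount_friends; infer_instance
def pvWitness_amount_friends : Int × List Int := (2, [0, 2, 1])

def Spec_amount_friends (n : Int) (numbers : List Int) (out : Int) : Prop := out = amount_friends_alt n numbers
instance (n : Int) (numbers : List Int) (out : Int) : Decidable (Spec_amount_friends n numbers out) := by unfold Spec_amount_friends; infer_instance

-- ===== CLAIM =====
def Claim_equal_amount_friends : Prop := ∀ (n : Int) (numbers : List Int), Dom_amount_friends n numbers → Pre_amount_friends n numbers → Spec_amount_friends n numbers (amount_friends n numbers)

-- ===== LEMMAS AND PROOFS =====

-- Reference one-pass: running max of the deficit i - prefix.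
def afRef (g : Int → Int) (l : List Int) (st : Int × Int) : Int × Int :=
  l.foldl (fun (st : Int × Int) (i : Int) => (max st.1 (i - st.2), st.2 + g i)) st

-- A's fold from (f, f + r) has the same friends component as the reference from (f, r).
theorem pv_fold_key (g : Int → Int) (l : List Int) (f r : Int) :
    ((l.foldl
      (fun (st : Int × Int) (i : Int) =>
        let amount_people := g i
        if st.2 < i then (st.1 + (i - st.2), st.2 + (i - st.2) + amount_people)
        else (st.1, st.2 + amount_people))
      (f, f + r)).1 : Int)
    = (afRef g l (f, r)).1 := by
  induction l generalizing f r with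
  | nil => rfl
  | cons i tl ih =>
    simp only [List.foldl_cons, afRef] at *
    by_cases h : f + r < i
    · rw [show (if ((f, f + r) : Int × Int).2 < i
              then ((f, f + r).1 + (i - (f, f + r).2), (f, f + r).2 + (i - (f, f + r).2) + g i)
              else ((f, f + r).1, (f, f + r).2 + g i))
            = ((i - r : Int), (i - r) + (r + g i)) from by
          simp only [if_pos h, Prod.mk.injEq]; constructor <;> ring,
        show ((max ((f, r) : Int × Int).1 (i - (f, r).2), ((f, r) : Int × Int).2 + g i) : Int × Int)
            = ((i - r : Int), r + g i) from by
          have hx : max f (i - r) = i - r := by omega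
          simpa using hx]
      exact ih (i - r) (r + g i)
    · rw [show (if ((f, f + r) : Int × Int).2 < i
              then ((f, f + r).1 + (i - (f, f + r).2), (f, f + r).2 + (i - (f, f + r).2) + g i)
              else ((f, f + r).1, (f, f + r).2 + g i))
            = (f, f + (r + g i)) from by
          simp only [if_neg h, Prod.mk.injEq]
          refine ⟨trivial, by ring⟩,
        show ((max ((f, r) : Int × Int).1 (i - (f, r).2), ((f, r) : Int × Int).2 + g i) : Int × Int)
            = (f, r + g i) from by
          have hx : max f (i - r) = f := by omega
          simpa using hx]
      exact ih f (r + g i)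

-- afBlock fully characterises the reference fold over the corresponding index range.
theorem pv_block_key (numbers : List Int) :
    ∀ (fuel : Nat) (lo hi : Int), lo < hi → (hi - lo).toNat ≤ fuel →
      lo ≤ (afBlock numbers fuel lo hi).2 ∧
      ∀ f r, afRef (fun i => PySem.List.pyGetD numbers i 0) (PySem.List.pyRange lo hi 1) (f, r)
        = (max f ((afBlock numbers fuel lo hi).2 - r), r + (afBlock numbers fuel lo hi).1) := by
  intro fuel
  induction fuel with
  | zero => intro lo hi hlt hk; omega
  | succ fuel ih =>
    intro lo hi hlt hk
    by_cases hbase : hi - lo ≤ 1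
    · have hhi : hi = lo + 1 := by omega
      simp only [afBlock, if_pos hbase]
      refine ⟨le_refl _, ?_⟩
      intro f r
      subst hhi
      rw [PySem.List.pyRange_one_singleton]
      simp [afRef]
    · simp only [afBlock, if_neg hbase]
      have hmid := PySem.Int.floordiv_two_mid_bounds (lo := lo) (hi := hi) (by omega)
      have h2 : PySem.Int.floordiv (lo + hi) 2 = (lo + hi) / 2 :=
        PySem.Int.floordiv_eq_ediv_of_pos (by omega)
      set mid := PySem.Int.floordiv (lo + hi) 2 with hmiddef
      have hlo : lo < mid := by omega
      have hhi2 : mid < hi := by omega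
      obtain ⟨hge1, h1⟩ := ih lo mid hlo (by omega)
      obtain ⟨hge2, h2'⟩ := ih mid hi hhi2 (by omega)
      constructor
      · exact le_trans hge1 (le_max_left _ _)
      · intro f r
        rw [PySem.List.pyRange_one_append lo mid hi (by omega) (by omega)]
        unfold afRef at *
        rw [List.foldl_append, h1 f r, h2' _ _]
        have hmax : max (max f ((afBlock numbers fuel lo mid).2 - r))
            ((afBlock numbers fuel mid hi).2 - (r + (afBlock numbers fuel lo mid).1))
            = max f (max (afBlock numbers fuel lo mid).2
                ((afBlock numbers fuel mid hi).2 - (afBlock numbers fuel lo mid).1) - r) := by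
          simp only [max_def]
          split_ifs <;> omega
        rw [hmax]
        ring_nf

-- ===== VERDICT =====
theorem amount_friends_spec : Claim_equal_amount_friends := by
  intro n numbers _ _
  unfold Spec_amount_friends amount_friends amount_friends_alt
  by_cases hn : n < 0
  · rw [PySem.List.pyRange_one_eq_nil (by omega)]
    simp [hn]
  · rw [if_neg hn]
    obtain ⟨hge, hmain⟩ := pv_block_key numbers (n + 1).toNat 0 (n + 1) (by omega) (by omega)
    have := pv_fold_key (fun i => PySem.List.pyGetD numbers i 0) (PySem.List.pyRange 0 (n + 1) 1) 0 0
    rw [show ((0, 0) : Int × Int) = ((0 : Int), (0 : Int) + (0 : Int)) from by norm_num,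
      this, hmain 0 0]
    simp
    omega
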